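-- pv_equiv track=rewrite | github.com/xcthomaswagner/agent-harness | services/l1_preprocessing/tracer.py | derive_trace_status
-- ===== SOURCE A (Python) =====
-- from typing import Any
--
-- def derive_trace_status(
--     entries: list[dict[str, Any]],
--     events: list[str],
--     pr_url: str,
-- ) -> str:
--     """Single source of truth for trace → status-label mapping.
--
--     Previously this logic was duplicated between ``list_traces`` (18
--     branches, covering the full set of dashboard labels) and
--     ``_build_summary`` (8 branches, silently missing half the cases —
--     Cleaned Up / Failed / Timed Out / Merged / Implementing / Planned /
--     CI Fix / Agent Done / Processing / Received — so the detail view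
--     fell back to ``events[-1] if events else "Unknown"`` for those
--     states). A re-triggered trace could then show one label in the list
--     view and a different label in the detail view.
--
--     The predicates run in order — the first match wins. ``entries`` is
--     accepted so branches that need to look at fields on individual
--     entries (not just the flat ``event`` name list) can do so.
--     """
--     if not entries:
--         return "Unknown"
--
--     if "stale_worktree_cleaned" in events:
--         # This run was cleaned up by a subsequent spawn.
--         return "Cleaned Up"
--     if "Escalated" in events:
--         return "Escalated"
--     if any(
--         e.get("event") == "agent_finished" and e.get("status") == "escalated"
--         for e in entries
--     ):
--         return "Failed"
--     if any("timed out" in ev.lower() for ev in events):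
--         return "Timed Out"
--     if "Pipeline complete" in events:
--         return "Complete"
--     if pr_url and not any("Pipeline complete" in ev for ev in events):
--         return "PR Created"
--     if any("QA complete" in ev for ev in events):
--         return "QA Done"
--     if any("Review complete" in ev for ev in events):
--         return "Review Done"
--     if any("Merge complete" in ev for ev in events):
--         return "Merged"
--     if any("unit-" in ev and "complete" in ev for ev in events):
--         return "Implementing"
--     if any("Plan" in ev and ("complete" in ev or "approved" in ev) for ev in events):
--         return "Planned"
--     if any("l2_dispatched" in ev for ev in events):
--         return "Dispatched"
--     if any("ci_fix_spawned" in ev for ev in events):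
--         return "CI Fix"
--     if any("agent_finished" in ev for ev in events) and not pr_url:
--         return "Agent Done (no PR)"
--     if any("processing_completed" in ev for ev in events):
--         return "Enriched"
--     if any("processing_started" in ev for ev in events):
--         return "Processing"
--     if any("webhook_received" in ev for ev in events):
--         return "Received"
--     last = entries[-1]
--     return str(last.get("event", "Unknown"))
-- ===== SOURCE B (Python) =====
-- def derive_trace_status(
--     entries: list,
--     events: list,
--     pr_url: str,
-- ) -> str:
--     """One pass over `events` collecting boolean flags for every predicate,
--     then a flat priority chain over the flags (first match wins)."""
--     if not entries:
--         return "Unknown"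
--
--     cleaned = escalated = timed_out = complete = pipeline_sub = False
--     qa = review = merge = unit = plan = dispatched = False
--     ci_fix = agent = enriched = processing = webhook = False
--     for ev in events:
--         cleaned = cleaned or ev == "stale_worktree_cleaned"
--         escalated = escalated or ev == "Escalated"
--         timed_out = timed_out or "timed out" in ev.lower()
--         complete = complete or ev == "Pipeline complete"
--         pipeline_sub = pipeline_sub or "Pipeline complete" in ev
--         qa = qa or "QA complete" in ev
--         review = review or "Review complete" in ev
--         merge = merge or "Merge complete" in ev
--         unit = unit or ("unit-" in ev and "complete" in ev)
--         plan = plan or ("Plan" in ev and ("complete" in ev or "approved" in ev))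
--         dispatched = dispatched or "l2_dispatched" in ev
--         ci_fix = ci_fix or "ci_fix_spawned" in ev
--         agent = agent or "agent_finished" in ev
--         enriched = enriched or "processing_completed" in ev
--         processing = processing or "processing_started" in ev
--         webhook = webhook or "webhook_received" in ev
--
--     failed = False
--     for e in entries:
--         if e.get("event") == "agent_finished" and e.get("status") == "escalated":
--             failed = True
--             break
--
--     if cleaned:
--         return "Cleaned Up"
--     if escalated:
--         return "Escalated"
--     if failed:
--         return "Failed"
--     if timed_out:
--         return "Timed Out"
--     if complete:
--         return "Complete"
--     if pr_url and not pipeline_sub: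
--         return "PR Created"
--     if qa:
--         return "QA Done"
--     if review:
--         return "Review Done"
--     if merge:
--         return "Merged"
--     if unit:
--         return "Implementing"
--     if plan:
--         return "Planned"
--     if dispatched:
--         return "Dispatched"
--     if ci_fix:
--         return "CI Fix"
--     if agent and not pr_url:
--         return "Agent Done (no PR)"
--     if enriched:
--         return "Enriched"
--     if processing:
--         return "Processing"
--     if webhook:
--         return "Received"
--     return str(entries[-1].get("event", "Unknown"))
-- ===== Notes on version B (the rewrite author's own statement) =====
-- stated objective: alternative
-- what changed: B replaces A's 17 separate any/membership scans over events (one per predicate branch) with a single pass that accumulates 16 boolean flags (plus one break-early scan of entries), then evaluates the same priority chain on the flags; same asymptotic cost, different traversal structure.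
import Mathlib
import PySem

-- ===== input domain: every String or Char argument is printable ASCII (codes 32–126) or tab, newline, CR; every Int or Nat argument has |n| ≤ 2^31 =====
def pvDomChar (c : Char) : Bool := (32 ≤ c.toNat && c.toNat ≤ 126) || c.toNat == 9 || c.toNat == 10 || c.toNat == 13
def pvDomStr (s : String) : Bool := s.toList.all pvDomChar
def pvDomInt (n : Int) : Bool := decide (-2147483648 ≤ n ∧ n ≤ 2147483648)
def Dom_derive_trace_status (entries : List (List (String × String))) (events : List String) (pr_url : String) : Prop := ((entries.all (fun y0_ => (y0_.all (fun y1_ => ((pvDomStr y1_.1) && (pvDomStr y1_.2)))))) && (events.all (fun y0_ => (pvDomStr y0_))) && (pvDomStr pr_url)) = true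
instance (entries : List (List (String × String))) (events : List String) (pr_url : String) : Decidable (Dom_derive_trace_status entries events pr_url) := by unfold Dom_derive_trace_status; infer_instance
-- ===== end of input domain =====

-- B replaces A's 17 separate scans of `events` with a single pass collecting boolean
-- flags, then evaluates the same priority chain on the flags (objective: alternative traversal, one pass).

-- ===== PORT A =====
-- literal transliteration of A: guard on empty entries, then ordered predicate scans
def derive_trace_status (entries : List (List (String × String))) (events : List String) (pr_url : String) : String :=
  match entries.getLast? with
  | none => "Unknown"          -- `if not entries: return "Unknown"`
  | some last =>
    if events.contains "stale_worktree_cleaned" then "Cleaned Up"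
    else if events.contains "Escalated" then "Escalated"
    else if entries.any (fun e =>
        ((PySem.Dict.mk e).get? "event" == some "agent_finished") &&
        ((PySem.Dict.mk e).get? "status" == some "escalated")) then "Failed"
    else if events.any (fun ev => PySem.Str.isIn "timed out" (PySem.Str.lower ev)) then "Timed Out"
    else if events.contains "Pipeline complete" then "Complete"
    else if !(pr_url == "") && !(events.any (fun ev => PySem.Str.isIn "Pipeline complete" ev)) then "PR Created"
    else if events.any (fun ev => PySem.Str.isIn "QA complete" ev) then "QA Done"
    else if events.any (fun ev => PySem.Str.isIn "Review complete" ev) then "Review Done"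
    else if events.any (fun ev => PySem.Str.isIn "Merge complete" ev) then "Merged"
    else if events.any (fun ev => PySem.Str.isIn "unit-" ev && PySem.Str.isIn "complete" ev) then "Implementing"
    else if events.any (fun ev => PySem.Str.isIn "Plan" ev && (PySem.Str.isIn "complete" ev || PySem.Str.isIn "approved" ev)) then "Planned"
    else if events.any (fun ev => PySem.Str.isIn "l2_dispatched" ev) then "Dispatched"
    else if events.any (fun ev => PySem.Str.isIn "ci_fix_spawned" ev) then "CI Fix"
    else if events.any (fun ev => PySem.Str.isIn "agent_finished" ev) && (pr_url == "") then "Agent Done (no PR)"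
    else if events.any (fun ev => PySem.Str.isIn "processing_completed" ev) then "Enriched"
    else if events.any (fun ev => PySem.Str.isIn "processing_started" ev) then "Processing"
    else if events.any (fun ev => PySem.Str.isIn "webhook_received" ev) then "Received"
    else (PySem.Dict.mk last).getD "event" "Unknown"   -- str(entries[-1].get("event","Unknown")), str() is identity on String

-- ===== PORT B =====
-- the 16 flags B accumulates in its single pass over `events`
structure PvFlags where
  cleaned : Bool
  escalated : Bool
  timed_out : Bool
  complete : Bool
  pipeline_sub : Bool
  qa : Bool
  review : Bool
  merge : Bool
  unit : Bool
  plan : Bool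
  dispatched : Bool
  ci_fix : Bool
  agent : Bool
  enriched : Bool
  processing : Bool
  webhook : Bool
deriving Repr, DecidableEq

def pvFlagsInit : PvFlags :=
  ⟨false, false, false, false, false, false, false, false,
   false, false, false, false, false, false, false, false⟩

-- one iteration of B's `for ev in events` loop
def pvStep (f : PvFlags) (ev : String) : PvFlags :=
  { cleaned := f.cleaned || (ev == "stale_worktree_cleaned")
    escalated := f.escalated || (ev == "Escalated")
    timed_out := f.timed_out || PySem.Str.isIn "timed out" (PySem.Str.lower ev)
    complete := f.complete || (ev == "Pipeline complete")
    pipeline_sub := f.pipeline_sub || PySem.Str.isIn "Pipeline complete" ev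
    qa := f.qa || PySem.Str.isIn "QA complete" ev
    review := f.review || PySem.Str.isIn "Review complete" ev
    merge := f.merge || PySem.Str.isIn "Merge complete" ev
    unit := f.unit || (PySem.Str.isIn "unit-" ev && PySem.Str.isIn "complete" ev)
    plan := f.plan || (PySem.Str.isIn "Plan" ev && (PySem.Str.isIn "complete" ev || PySem.Str.isIn "approved" ev))
    dispatched := f.dispatched || PySem.Str.isIn "l2_dispatched" ev
    ci_fix := f.ci_fix || PySem.Str.isIn "ci_fix_spawned" ev
    agent := f.agent || PySem.Str.isIn "agent_finished" ev
    enriched := f.enriched || PySem.Str.isIn "processing_completed" ev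
    processing := f.processing || PySem.Str.isIn "processing_started" ev
    webhook := f.webhook || PySem.Str.isIn "webhook_received" ev }

-- B's entries loop (`for e in entries: … break`) as a structural recursion
def pvFailedScan (entries : List (List (String × String))) : Bool :=
  match entries with
  | [] => false
  | e :: rest =>
    if ((PySem.Dict.mk e).get? "event" == some "agent_finished") &&
       ((PySem.Dict.mk e).get? "status" == some "escalated") then true
    else pvFailedScan rest

def derive_trace_status_alt (entries : List (List (String × String))) (events : List String) (pr_url : String) : String :=
  match entries.getLast? with
  | none => "Unknown"
  | some last =>
    let f := events.foldl pvStep pvFlagsInit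
    let failed := pvFailedScan entries
    if f.cleaned then "Cleaned Up"
    else if f.escalated then "Escalated"
    else if failed then "Failed"
    else if f.timed_out then "Timed Out"
    else if f.complete then "Complete"
    else if !(pr_url == "") && !f.pipeline_sub then "PR Created"
    else if f.qa then "QA Done"
    else if f.review then "Review Done"
    else if f.merge then "Merged"
    else if f.unit then "Implementing"
    else if f.plan then "Planned"
    else if f.dispatched then "Dispatched"
    else if f.ci_fix then "CI Fix"
    else if f.agent && (pr_url == "") then "Agent Done (no PR)"
    else if f.enriched then "Enriched"
    else if f.processing then "Processing"
    else if f.webhook then "Received"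
    else (PySem.Dict.mk last).getD "event" "Unknown"

-- ===== PRECONDITION & SPEC =====
def Spec_derive_trace_status (entries : List (List (String × String))) (events : List String) (pr_url : String) (out : String) : Prop := out = derive_trace_status_alt entries events pr_url
instance (entries : List (List (String × String))) (events : List String) (pr_url : String) (out : String) : Decidable (Spec_derive_trace_status entries events pr_url out) := by unfold Spec_derive_trace_status; infer_instance

-- ===== CLAIM (what is proved, stated in full; the proofs are below) =====
def Claim_equal_derive_trace_status : Prop := ∀ (entries : List (List (String × String))) (events : List String) (pr_url : String), Dom_derive_trace_status entries events pr_url → Spec_derive_trace_status entries events pr_url (derive_trace_status entries events pr_url)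

-- ===== LEMMAS AND PROOFS =====

-- the single fold computes, fieldwise, exactly the 16 `any`-scans of A
theorem foldl_pvStep (events : List String) (f : PvFlags) :
    events.foldl pvStep f =
      ⟨f.cleaned || events.any (· == "stale_worktree_cleaned"),
       f.escalated || events.any (· == "Escalated"),
       f.timed_out || events.any (fun ev => PySem.Str.isIn "timed out" (PySem.Str.lower ev)),
       f.complete || events.any (· == "Pipeline complete"),
       f.pipeline_sub || events.any (fun ev => PySem.Str.isIn "Pipeline complete" ev),
       f.qa || events.any (fun ev => PySem.Str.isIn "QA complete" ev),
       f.review || events.any (fun ev => PySem.Str.isIn "Review complete" ev),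
       f.merge || events.any (fun ev => PySem.Str.isIn "Merge complete" ev),
       f.unit || events.any (fun ev => PySem.Str.isIn "unit-" ev && PySem.Str.isIn "complete" ev),
       f.plan || events.any (fun ev => PySem.Str.isIn "Plan" ev && (PySem.Str.isIn "complete" ev || PySem.Str.isIn "approved" ev)),
       f.dispatched || events.any (fun ev => PySem.Str.isIn "l2_dispatched" ev),
       f.ci_fix || events.any (fun ev => PySem.Str.isIn "ci_fix_spawned" ev),
       f.agent || events.any (fun ev => PySem.Str.isIn "agent_finished" ev),
       f.enriched || events.any (fun ev => PySem.Str.isIn "processing_completed" ev),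
       f.processing || events.any (fun ev => PySem.Str.isIn "processing_started" ev),
       f.webhook || events.any (fun ev => PySem.Str.isIn "webhook_received" ev)⟩ := by
  induction events generalizing f with
  | nil => simp
  | cons ev rest ih =>
    simp only [List.foldl_cons, List.any_cons, ih, pvStep]
    simp [Bool.or_assoc]

-- B's break-loop over entries is A's `any`
theorem pvFailedScan_eq_any (entries : List (List (String × String))) :
    pvFailedScan entries = entries.any (fun e =>
      ((PySem.Dict.mk e).get? "event" == some "agent_finished") &&
      ((PySem.Dict.mk e).get? "status" == some "escalated")) := by
  induction entries with
  | nil => rfl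
  | cons e rest ih =>
    simp only [pvFailedScan, List.any_cons, ih]
    split <;> simp_all

-- ===== VERDICT (by name: the statement is the Claim_ definition above) =====
theorem derive_trace_status_spec : Claim_equal_derive_trace_status := by
  intro entries events pr_url _
  unfold Spec_derive_trace_status derive_trace_status derive_trace_status_alt
  cases entries.getLast? with
  | none => rfl
  | some last =>
    simp only [foldl_pvStep, pvFailedScan_eq_any, pvFlagsInit, Bool.false_or,
      List.contains_eq_any_beq, BEq.comm]
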